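-- pv_equiv track=rewrite | github.com/mofishing/PQC | pqscan/abstract_syntax_tree/extractor.py | build_multiline_go_declaration
-- ===== SOURCE A (Python) =====
-- def build_multiline_go_declaration(lines: list, start_ln: int, max_lines: int = 20) -> str:
--     """
--     构建跨行的 Go 变量声明字符串
--
--     用于处理跨多行的初始化，例如：
--     ```go
--     key := []byte{
--         0x00, 0x01, 0x02,
--         0x03, 0x04, 0x05,
--     }
--     ```
--
--     Args:
--         lines: 源代码行列表
--         start_ln: 声明起始行号（1-based）
--         max_lines: 最多向下查找的行数
--
--     Returns:
--         完整的声明字符串（合并多行）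
--
--     Example:
--         >>> decl = build_multiline_go_declaration(lines, 10, max_lines=20)
--         >>> # 返回: "key := []byte{\\n    0x00, 0x01,\\n    ...\\n}"
--
--     Note:
--         自动检测花括号配对，找到完整的声明语句
--     """
--     if start_ln < 1 or start_ln > len(lines):
--         return ""
--
--     decl_lines = [lines[start_ln - 1]]
--     open_count = decl_lines[0].count("{") - decl_lines[0].count("}")
--
--     # 继续读取后续行直到括号配对
--     for offset in range(1, max_lines):
--         next_ln = start_ln + offset
--         if next_ln > len(lines):
--             break
--
--         line = lines[next_ln - 1]
--         decl_lines.append(line)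
--         open_count += line.count("{") - line.count("}")
--
--         # 括号配对完成
--         if open_count <= 0:
--             break
--
--     return "\n".join(decl_lines)
-- ===== SOURCE B (Python) =====
-- def build_multiline_go_declaration(lines: list, start_ln: int, max_lines: int = 20) -> str:
--     if not (1 <= start_ln <= len(lines)):
--         return ""
--     lo = start_ln - 1
--     window = lines[lo: lo + max(max_lines, 1)]
--     first, rest = window[0], window[1:]
--
--     def extend(bal, rest):
--         if not rest:
--             return []
--         head, tail = rest[0], rest[1:]
--         bal += head.count("{") - head.count("}")
--         return [head] if bal <= 0 else [head] + extend(bal, tail)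
--
--     return "\n".join([first] + extend(first.count("{") - first.count("}"), rest))
-- ===== Notes on version B (the rewrite author's own statement) =====
-- stated objective: alternative
-- what changed: A's index-based loop with a per-iteration bounds check and a growing line accumulator is replaced by slicing the candidate window out of lines once and running a recursive brace-balance scan (extend) over it.
import Mathlib
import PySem

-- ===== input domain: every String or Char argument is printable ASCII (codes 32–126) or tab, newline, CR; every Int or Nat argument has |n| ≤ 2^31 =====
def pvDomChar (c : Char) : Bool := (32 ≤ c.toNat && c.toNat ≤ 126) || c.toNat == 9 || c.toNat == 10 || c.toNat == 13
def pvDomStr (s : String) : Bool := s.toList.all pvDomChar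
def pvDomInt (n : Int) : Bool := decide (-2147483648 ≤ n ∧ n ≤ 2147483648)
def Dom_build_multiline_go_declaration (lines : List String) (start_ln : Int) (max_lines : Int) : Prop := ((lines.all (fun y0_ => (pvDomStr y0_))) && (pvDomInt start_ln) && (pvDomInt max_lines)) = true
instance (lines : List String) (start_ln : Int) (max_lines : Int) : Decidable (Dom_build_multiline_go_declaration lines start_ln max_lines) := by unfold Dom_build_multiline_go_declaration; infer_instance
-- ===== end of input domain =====

-- B replaces A's index-based loop (per-iteration bounds check, growing accumulator) by slicing the
-- candidate window once and running a recursive brace-balance scan over it; objective: alternative.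


-- ===== PORT A =====
-- the 'for offset in range(1, max_lines)' loop with its break conditions
def pvALoop (lines : List String) (start_ln : Int) : List Int → List String → Int → List String
  | [], decl_lines, _ => decl_lines
  | offset :: rest, decl_lines, open_count =>
    let next_ln := start_ln + offset
    if (lines.length : Int) < next_ln then decl_lines
    else
      -- index next_ln - 1 is in range here (1 ≤ start_ln and 1 ≤ offset on every call), so getD "" is exact
      let line := (PySem.List.pyGet? lines (next_ln - 1)).getD ""
      let decl_lines2 := decl_lines ++ [line]
      let oc := open_count + ((PySem.Str.count line "{" : Int) - (PySem.Str.count line "}" : Int))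
      if oc ≤ 0 then decl_lines2 else pvALoop lines start_ln rest decl_lines2 oc

def build_multiline_go_declaration (lines : List String) (start_ln : Int) (max_lines : Int) : String :=
  if start_ln < 1 ∨ (lines.length : Int) < start_ln then ""
  else
    -- index start_ln - 1 is in range here, so getD "" is exact
    let first := (PySem.List.pyGet? lines (start_ln - 1)).getD ""
    let open_count := (PySem.Str.count first "{" : Int) - (PySem.Str.count first "}" : Int)
    PySem.Str.join "\n" (pvALoop lines start_ln (PySem.List.pyRange 1 max_lines 1) [first] open_count)

-- ===== PORT B =====
-- Source B's recursive helper 'extend(bal, rest)'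
def pvExtend : Int → List String → List String
  | _, [] => []
  | bal, head :: tail =>
    let bal2 := bal + ((PySem.Str.count head "{" : Int) - (PySem.Str.count head "}" : Int))
    if bal2 ≤ 0 then [head] else head :: pvExtend bal2 tail

def build_multiline_go_declaration_alt (lines : List String) (start_ln : Int) (max_lines : Int) : String :=
  if ¬ (1 ≤ start_ln ∧ start_ln ≤ (lines.length : Int)) then ""
  else
    match PySem.List.slice lines (some (start_ln - 1)) (some (start_ln - 1 + max max_lines 1)) with
    | [] => ""  -- unreachable: start_ln - 1 is in range, so the window is nonempty
    | first :: rest =>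
      PySem.Str.join "\n"
        (first :: pvExtend ((PySem.Str.count first "{" : Int) - (PySem.Str.count first "}" : Int)) rest)

-- ===== PRECONDITION & SPEC =====
def Spec_build_multiline_go_declaration (lines : List String) (start_ln : Int) (max_lines : Int) (out : String) : Prop := out = build_multiline_go_declaration_alt lines start_ln max_lines
instance (lines : List String) (start_ln : Int) (max_lines : Int) (out : String) : Decidable (Spec_build_multiline_go_declaration lines start_ln max_lines out) := by unfold Spec_build_multiline_go_declaration; infer_instance

-- ===== CLAIM (what is proved, stated in full; the proofs are below) =====
def Claim_equal_build_multiline_go_declaration : Prop := ∀ (lines : List String) (start_ln : Int) (max_lines : Int), Dom_build_multiline_go_declaration lines start_ln max_lines → Spec_build_multiline_go_declaration lines start_ln max_lines (build_multiline_go_declaration lines start_ln max_lines)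

-- ===== LEMMAS AND PROOFS =====

-- A's loop over offsets a, a+1, …, a+k-1 collects exactly pvExtend over the corresponding slice
theorem pvALoop_eq (lines : List String) (start_ln : Int) (h1 : 1 ≤ start_ln) :
    ∀ (k : Nat) (a : Int), 1 ≤ a → ∀ (acc : List String) (bal : Int),
      pvALoop lines start_ln (PySem.List.pyRange a (a + k) 1) acc bal
        = acc ++ pvExtend bal
            (PySem.List.slice lines (some (start_ln + a - 1)) (some (start_ln + a - 1 + k))) := by
  intro k
  induction k with
  | zero =>
    intro a ha acc bal
    rw [PySem.List.pyRange_one_eq_nil (by omega)]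
    rw [PySem.List.slice_toNat _ (by omega) (by omega)]
    simp [pvALoop, pvExtend]
  | succ k ih =>
    intro a ha acc bal
    push_cast
    rw [PySem.List.pyRange_one_cons (by omega)]
    have hlo : (0 : Int) ≤ start_ln + a - 1 := by omega
    set lo : Nat := (start_ln + a - 1).toNat with hloN
    rw [PySem.List.slice_toNat _ hlo (by omega)]
    have hcnt : (start_ln + a - 1 + (↑k + 1)).toNat - lo = k + 1 := by omega
    rw [hcnt]
    by_cases hb : (lines.length : Int) < start_ln + a
    · -- past the end: both sides are acc
      have hdrop : lines.drop lo = ([] : List String) := List.drop_eq_nil_of_le (by omega)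
      rw [show pvALoop lines start_ln (a :: PySem.List.pyRange (a+1) (a + (↑k+1)) 1) acc bal
            = acc from by simp [pvALoop, hb]]
      rw [hdrop]
      simp [pvExtend]
    · -- in range: peel one line off
      have hlt : lo < lines.length := by omega
      have hdrop : lines.drop lo = lines[lo] :: lines.drop (lo + 1) :=
        List.drop_eq_getElem_cons hlt
      have hget : (PySem.List.pyGet? lines (start_ln + a - 1)).getD "" = lines[lo] := by
        rw [PySem.List.pyGet?_of_nonneg _ hlo, ← hloN]
        simp [hlt]
      rw [hdrop, List.take_succ_cons]
      show (if (lines.length : Int) < start_ln + a then acc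
            else
              let line := (PySem.List.pyGet? lines (start_ln + a - 1)).getD ""
              let decl_lines2 := acc ++ [line]
              let oc := bal + ((PySem.Str.count line "{" : Int) - (PySem.Str.count line "}" : Int))
              if oc ≤ 0 then decl_lines2
              else pvALoop lines start_ln (PySem.List.pyRange (a+1) (a + (↑k+1)) 1) decl_lines2 oc) = _
      rw [if_neg hb]
      simp only [hget, pvExtend]
      split_ifs with hoc
      · simp
      · rw [show a + (↑k + 1) = (a + 1) + (k : Int) from by ring]
        rw [ih (a + 1) (by omega)]
        rw [PySem.List.slice_toNat _ (by omega) (by omega)]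
        have h1' : (start_ln + (a + 1) - 1).toNat = lo + 1 := by omega
        have h2' : (start_ln + (a + 1) - 1 + (k : Int)).toNat - (start_ln + (a + 1) - 1).toNat = k := by
          omega
        rw [h2', h1']
        simp

theorem build_multiline_go_declaration_eq_alt (lines : List String) (start_ln : Int) (max_lines : Int) :
    build_multiline_go_declaration lines start_ln max_lines
      = build_multiline_go_declaration_alt lines start_ln max_lines := by
  unfold build_multiline_go_declaration build_multiline_go_declaration_alt
  by_cases hok : 1 ≤ start_ln ∧ start_ln ≤ (lines.length : Int)
  · rw [if_neg (by omega), if_neg (by simpa using hok)]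
    dsimp only
    obtain ⟨h1, h2⟩ := hok
    set k : Nat := (max_lines - 1).toNat with hk
    have hrange : PySem.List.pyRange 1 max_lines 1 = PySem.List.pyRange 1 (1 + (k : Int)) 1 := by
      rw [PySem.List.pyRange_one, PySem.List.pyRange_one]
      congr 2
      omega
    rw [hrange, pvALoop_eq lines start_ln h1 k 1 le_rfl]
    -- A's tail slice, as drop/take
    rw [PySem.List.slice_toNat _ (by omega) (by omega)]
    have ha2 : (start_ln + 1 - 1 + (k : Int)).toNat - (start_ln + 1 - 1).toNat = k := by omega
    have ha1 : (start_ln + 1 - 1).toNat = (start_ln - 1).toNat + 1 := by omega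
    rw [ha2, ha1]
    -- B's window, as drop/take
    have hmax : start_ln - 1 + max max_lines 1 = start_ln - 1 + (1 + (k : Int)) := by
      rcases le_or_gt max_lines 1 with h | h
      · rw [max_eq_right h]; omega
      · rw [max_eq_left (by omega)]; omega
    have hs0 : (start_ln - 1).toNat < lines.length := by omega
    have hdrop : lines.drop (start_ln - 1).toNat
        = lines[(start_ln - 1).toNat] :: lines.drop ((start_ln - 1).toNat + 1) :=
      List.drop_eq_getElem_cons hs0
    have hcnt : (start_ln - 1 + (1 + (k : Int))).toNat - (start_ln - 1).toNat = k + 1 := by omega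
    have hget : (PySem.List.pyGet? lines (start_ln - 1)).getD "" = lines[(start_ln - 1).toNat] := by
      rw [PySem.List.pyGet?_of_nonneg _ (by omega), List.getElem?_eq_getElem hs0]
      rfl
    rw [hmax, PySem.List.slice_toNat _ (by omega) (by omega), hcnt, hdrop, List.take_succ_cons, hget]
    simp
  · rw [if_pos (by omega), if_pos (by simpa using hok)]
-- ===== VERDICT (by name: the statement is the Claim_ definition above) =====
theorem build_multiline_go_declaration_spec : Claim_equal_build_multiline_go_declaration := by
  intro lines start_ln max_lines _
  exact build_multiline_go_declaration_eq_alt lines start_ln max_lines
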